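-- pv_equiv track=rewrite | github.com/romantudorofficial/University_PythonProgramming | Homework/Homework_3/Workspace.py | countUniqueAndDuplicates
-- ===== SOURCE A (Python) =====
-- def countUniqueAndDuplicates (elements):
--
--     uniqueElements = set()
--     duplicateElements = set()
--
--     for item in elements:
--         if item in uniqueElements:
--             duplicateElements.add(item)
--         else:
--             uniqueElements.add(item)
--
--     numberOfUnique = len(uniqueElements - duplicateElements)
--     numberOfDuplicates = len(duplicateElements)
--
--     return numberOfUnique, numberOfDuplicates
-- ===== SOURCE B (Python) =====
-- def countUniqueAndDuplicates(elements):
--     counts = {}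
--     for item in elements:
--         counts[item] = counts.get(item, 0) + 1
--     numberOfUnique = 0
--     numberOfDuplicates = 0
--     for c in counts.values():
--         if c == 1:
--             numberOfUnique += 1
--         else:
--             numberOfDuplicates += 1
--     return numberOfUnique, numberOfDuplicates
-- ===== Notes on version B (the rewrite author's own statement) =====
-- stated objective: idiomatic
-- what changed: B builds one frequency dictionary in a single pass and then classifies distinct elements by thresholding their counts, instead of A's online maintenance of two sets with a set-difference at the end.
import Mathlib
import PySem

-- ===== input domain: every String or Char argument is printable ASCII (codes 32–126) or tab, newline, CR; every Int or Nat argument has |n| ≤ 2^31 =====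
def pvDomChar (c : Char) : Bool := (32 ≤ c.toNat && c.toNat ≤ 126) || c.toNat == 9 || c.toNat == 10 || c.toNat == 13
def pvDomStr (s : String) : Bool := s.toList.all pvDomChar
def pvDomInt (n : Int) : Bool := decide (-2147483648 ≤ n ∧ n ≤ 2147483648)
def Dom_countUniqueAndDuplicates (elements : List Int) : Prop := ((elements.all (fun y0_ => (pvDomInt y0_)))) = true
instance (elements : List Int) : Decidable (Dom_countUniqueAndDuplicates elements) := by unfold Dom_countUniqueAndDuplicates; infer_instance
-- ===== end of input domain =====

-- B builds one frequency dictionary first and classifies distinct elements by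
-- thresholding the counts, instead of A's online two-set maintenance (idiomatic rewrite).


-- ===== PORT A =====
def countUniqueAndDuplicates (elements : List Int) : Int × Int :=
  let st := elements.foldl
    (fun (st : PySem.Set Int × PySem.Set Int) item =>
      if PySem.Set.contains st.1 item then (st.1, PySem.Set.add st.2 item)
      else (PySem.Set.add st.1 item, st.2))
    (PySem.Set.empty, PySem.Set.empty)
  (PySem.Set.len (PySem.Set.diff st.1 st.2), PySem.Set.len st.2)

-- ===== PORT B =====
def countUniqueAndDuplicates_alt (elements : List Int) : Int × Int :=
  let counts := elements.foldl
    (fun (d : PySem.Dict Int Int) item => d.insert item (d.getD item 0 + 1))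
    PySem.Dict.empty
  counts.values.foldl
    (fun (acc : Int × Int) c => if c == 1 then (acc.1 + 1, acc.2) else (acc.1, acc.2 + 1))
    (0, 0)

-- ===== PRECONDITION & SPEC =====
def Spec_countUniqueAndDuplicates (elements : List Int) (out : Int × Int) : Prop := out = countUniqueAndDuplicates_alt elements
instance (elements : List Int) (out : Int × Int) : Decidable (Spec_countUniqueAndDuplicates elements out) := by unfold Spec_countUniqueAndDuplicates; infer_instance

-- ===== CLAIM (what is proved, stated in full; the proofs are below) =====
def Claim_equal_countUniqueAndDuplicates : Prop := ∀ (elements : List Int), Dom_countUniqueAndDuplicates elements → Spec_countUniqueAndDuplicates elements (countUniqueAndDuplicates elements)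

-- ===== LEMMAS AND PROOFS =====

-- A's loop body, named for the proofs (definitionally the lambda in the port)
def stepA (st : PySem.Set Int × PySem.Set Int) (item : Int) : PySem.Set Int × PySem.Set Int :=
  if PySem.Set.contains st.1 item then (st.1, PySem.Set.add st.2 item)
  else (PySem.Set.add st.1 item, st.2)

-- two nodup lists with the same members have the same length
theorem len_eq_of_mem_iff {s t : List Int} (hs : s.Nodup) (ht : t.Nodup)
    (h : ∀ x, x ∈ s ↔ x ∈ t) : s.length = t.length :=
  ((List.perm_ext_iff_of_nodup hs ht).mpr h).length_eq

-- B's tallying pass, in closed form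
theorem tally_foldl (l : List Int) (a b : Int) :
    l.foldl (fun (acc : Int × Int) c => if c == 1 then (acc.1 + 1, acc.2) else (acc.1, acc.2 + 1)) (a, b)
      = (a + l.countP (fun c => c == 1), b + l.countP (fun c => !(c == 1))) := by
  induction l generalizing a b with
  | nil => simp
  | cons h t ih =>
      rw [List.foldl_cons]
      by_cases hc : h = (1 : Int)
      · rw [if_pos (by simp [hc]), ih]
        simp [hc]
        omega
      · rw [if_neg (by simp [hc]), ih]
        simp [hc]
        omega

-- A's loop invariant: first set = all elements seen so far, second set is a nodup
-- list whose members are exactly those already marked or seen at least twice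
theorem loopA (l : List Int) (u d : PySem.Set Int) (hu : u.Nodup) (hd : d.Nodup) :
    (l.foldl stepA (u, d)).1 = PySem.Set.update u l
    ∧ (l.foldl stepA (u, d)).2.Nodup
    ∧ ∀ x, x ∈ (l.foldl stepA (u, d)).2
        ↔ x ∈ d ∨ (x ∈ u ∧ 0 < l.count x) ∨ 2 ≤ l.count x := by
  induction l generalizing u d with
  | nil => simpa [PySem.Set.update] using hd
  | cons h t ih =>
      by_cases hmem : h ∈ u
      · have hb : PySem.Set.contains u h = true := (PySem.Set.contains_iff u h).mpr hmem
        have hc : stepA (u, d) h = (u, PySem.Set.add d h) := by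
          unfold stepA; rw [hb]; simp
        obtain ⟨h1, h2, h3⟩ := ih u (PySem.Set.add d h) hu (PySem.Set.nodup_add d h hd)
        rw [List.foldl_cons, hc]
        refine ⟨?_, h2, ?_⟩
        · rw [h1]
          simp [PySem.Set.update, PySem.Set.add_of_mem hmem]
        · intro x
          rw [h3 x]
          simp only [PySem.Set.mem_add, List.count_cons]
          by_cases hxh : x = h
          · subst hxh
            simp [hmem]
          · simp [hxh, Ne.symm hxh]
      · have hb : PySem.Set.contains u h = false :=
          Bool.eq_false_iff.mpr (fun hbb => hmem ((PySem.Set.contains_iff u h).mp hbb))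
        have hc : stepA (u, d) h = (PySem.Set.add u h, d) := by
          unfold stepA; rw [hb]; simp
        obtain ⟨h1, h2, h3⟩ := ih (PySem.Set.add u h) d (PySem.Set.nodup_add u h hu) hd
        rw [List.foldl_cons, hc]
        refine ⟨?_, h2, ?_⟩
        · rw [h1]
          simp [PySem.Set.update]
        · intro x
          rw [h3 x]
          simp only [PySem.Set.mem_add, List.count_cons]
          by_cases hxh : x = h
          · subst hxh
            have hcnt := @List.count_pos_iff _ _ _ x t
            by_cases hxd : x ∈ d
            · simp [hxd]
            · by_cases hxt : x ∈ t
              · have h1 : 0 < List.count x t := hcnt.mpr hxt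
                simp [hxd, hmem, hxt]
              · have h1 : List.count x t = 0 := by
                  by_contra hne
                  exact hxt (hcnt.mp (by omega))
                simp [hxd, hmem, h1]
          · simp [hxh, Ne.symm hxh]

-- B in closed form: count the distinct elements by their multiplicity
theorem alt_closed (el : List Int) :
    countUniqueAndDuplicates_alt el
      = (((PySem.Set.ofList el).countP (fun k => decide (List.count k el = 1)) : Int),
         ((PySem.Set.ofList el).countP (fun k => decide (2 ≤ List.count k el)) : Int)) := by
  unfold countUniqueAndDuplicates_alt
  rw [PySem.Dict.foldl_insert_getD_add_one_eq_counter]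
  show (PySem.Dict.counter el).values.foldl
      (fun (acc : Int × Int) c => if c == 1 then (acc.1 + 1, acc.2) else (acc.1, acc.2 + 1)) (0, 0) = _
  have hnd : (PySem.Dict.counter el).keys.Nodup := by
    rw [PySem.Dict.keys_counter]; exact PySem.Set.nodup_ofList el
  rw [PySem.Dict.values_eq_map_keys (PySem.Dict.counter el) hnd 0, PySem.Dict.keys_counter]
  have hmap : List.map (fun k => (PySem.Dict.counter el).getD k 0) (PySem.Set.ofList el)
      = List.map (fun k => ((List.count k el : Int))) (PySem.Set.ofList el) := by
    apply List.map_congr_left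
    intro k _
    exact PySem.Dict.getD_counter el k
  rw [hmap, tally_foldl, List.countP_map, List.countP_map]
  have c1 : (PySem.Set.ofList el).countP ((fun c => c == (1 : Int)) ∘ fun k => ((List.count k el : Int)))
      = (PySem.Set.ofList el).countP (fun k => decide (List.count k el = 1)) := by
    apply List.countP_congr
    intro x _
    simp [Function.comp]
  have c2 : (PySem.Set.ofList el).countP ((fun c => !(c == (1 : Int))) ∘ fun k => ((List.count k el : Int)))
      = (PySem.Set.ofList el).countP (fun k => decide (2 ≤ List.count k el)) := by
    apply List.countP_congr
    intro x hx
    have hpos : 0 < List.count x el := List.count_pos_iff.mpr ((PySem.Set.mem_ofList el x).mp hx)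
    simp [Function.comp]
    omega
  rw [c1, c2]
  simp

-- ===== VERDICT (by name: the statement is the Claim_ definition above) =====
theorem countUniqueAndDuplicates_spec : Claim_equal_countUniqueAndDuplicates := by
  unfold Claim_equal_countUniqueAndDuplicates
  intro el _
  unfold Spec_countUniqueAndDuplicates
  rw [alt_closed]
  show (let st := el.foldl stepA (PySem.Set.empty, PySem.Set.empty)
        (PySem.Set.len (PySem.Set.diff st.1 st.2), PySem.Set.len st.2)) = _
  obtain ⟨h1, h2, h3⟩ := loopA el PySem.Set.empty PySem.Set.empty List.nodup_nil List.nodup_nil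
  set st := el.foldl stepA (PySem.Set.empty, PySem.Set.empty) with hst
  have hmem2 : ∀ x, x ∈ st.2 ↔ 2 ≤ List.count x el := by
    intro x
    rw [h3 x]
    simp [PySem.Set.empty]
  have hu : st.1 = PySem.Set.ofList el := by
    rw [h1]; exact PySem.Set.update_nil_left el
  have hlen2 : st.2.length = (PySem.Set.ofList el).countP (fun k => decide (2 ≤ List.count k el)) := by
    rw [List.countP_eq_length_filter]
    apply len_eq_of_mem_iff h2 (List.Nodup.filter _ (PySem.Set.nodup_ofList el))
    intro x
    rw [hmem2 x, List.mem_filter, PySem.Set.mem_ofList]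
    constructor
    · intro hx
      exact ⟨List.count_pos_iff.mp (by omega), by simpa using hx⟩
    · rintro ⟨_, hx⟩
      simpa using hx
  have hlen1 : (PySem.Set.diff st.1 st.2).length
      = (PySem.Set.ofList el).countP (fun k => decide (List.count k el = 1)) := by
    rw [List.countP_eq_length_filter]
    apply len_eq_of_mem_iff
      (PySem.Set.nodup_diff st.1 st.2 (hu ▸ PySem.Set.nodup_ofList el))
      (List.Nodup.filter _ (PySem.Set.nodup_ofList el))
    intro x
    rw [PySem.Set.mem_diff, hmem2 x, hu, PySem.Set.mem_ofList, List.mem_filter, PySem.Set.mem_ofList]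
    constructor
    · rintro ⟨hx, hx2⟩
      have := List.count_pos_iff.mpr hx
      exact ⟨hx, by simp; omega⟩
    · rintro ⟨hx, hx2⟩
      simp at hx2
      exact ⟨hx, by omega⟩
  simp only [PySem.Set.len]
  rw [hlen1, hlen2]
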